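-- pv_equiv track=rewrite | github.com/Mattriplex/DoNIMator | Nim.py | play_perfect
-- ===== SOURCE A (Python) =====
-- nimMax = 3
--
-- def play_perfect(rows):
--     # count non zero rows
--     nonzeroes =  len(rows) - rows.count(0)
--     # zip with index for later, sort in ascending order
--     lrows = sorted([(val, idx) for (idx, val) in enumerate(rows)])
--     # then, map the game state onto the cyclic N^kxk tensor, where k = nimMax + 1
--     lrows = [(val % (nimMax + 1), idx) for (val, idx) in lrows]
--
--     # determine tensor index
--     idx = tensor_index(lrows)
--     if idx == 0:
--         return lrows[-1][1], 1  # this is a losing position, take the minimal amount to prolong game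
--     else:
--         failctr = 0
--         while rows[lrows[-1][1]] < idx:  # if the row doesn't allow the perfect play, rotate rows
--             if failctr == nonzeroes:
--                 break
--
--             failctr += 1
--
--         return lrows[-1][1], idx  # this is a winning position, move opponent to losing position
--
-- def tensor_index(vals):
--     # remove zeroes from list
--     nzvals = [(val, idx) for (val, idx) in vals if val != 0]
--     idx = 0
--     while len(nzvals) > 0:
--         idx = (idx + nzvals[0][0]) % (nimMax + 1)
--         del nzvals[0]
--     return idx
-- ===== SOURCE B (Python) =====
-- nimMax = 3
--
-- def play_perfect(rows):
--     # index of the maximal (value, index) pair = last occurrence of the maximum value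
--     best = max(range(len(rows)), key=lambda i: (rows[i], i))
--     s = sum(rows) % (nimMax + 1)
--     return best, s or 1
-- ===== Notes on version B (the rewrite author's own statement) =====
-- stated objective: faster
-- what changed: B replaces A's sort-then-take-last with a single linear max over indices, computes the tensor index as sum(rows) % 4 directly instead of sorting, mod-mapping, filtering and folding, and drops A's no-op while loop.
import Mathlib
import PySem

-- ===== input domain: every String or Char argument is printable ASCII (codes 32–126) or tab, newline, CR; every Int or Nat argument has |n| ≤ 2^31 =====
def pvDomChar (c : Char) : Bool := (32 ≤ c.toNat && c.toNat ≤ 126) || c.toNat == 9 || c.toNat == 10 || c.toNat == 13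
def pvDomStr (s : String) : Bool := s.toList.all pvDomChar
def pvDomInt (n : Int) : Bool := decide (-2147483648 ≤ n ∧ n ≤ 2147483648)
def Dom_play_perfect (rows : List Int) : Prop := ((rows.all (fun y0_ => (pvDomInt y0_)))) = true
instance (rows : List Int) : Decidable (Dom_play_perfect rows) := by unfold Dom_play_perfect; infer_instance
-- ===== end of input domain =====

-- B replaces A's sort-then-take-last by a single linear max over indices and computes the Nim
-- tensor index as sum(rows) % 4 directly, dropping A's no-op while loop (objective: faster).

-- ===== PORT A =====
def nimMax : Int := 3

-- 'while len(nzvals) > 0: idx = (idx + nzvals[0][0]) % (nimMax + 1); del nzvals[0]'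
def tensorLoop : List (Int × Int) → Int → Int
  | [], idx => idx
  | p :: rest, idx => tensorLoop rest (PySem.Int.mod (idx + p.1) (nimMax + 1))

def tensor_index (vals : List (Int × Int)) : Int :=
  let nzvals := vals.filter (fun p => p.1 ≠ 0)
  tensorLoop nzvals 0

-- A's 'while rows[last] < idx: if failctr == nonzeroes: break; failctr += 1' — the condition is
-- loop-invariant; ported with fuel (nonzeroes+1).toNat, enough for failctr to climb from 0 to
-- nonzeroes (failctr starts at 0 and nonzeroes ≥ 0, so the Python loop always terminates this way).
def failLoop (cond : Bool) (nonzeroes : Int) : Nat → Int → Int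
  | 0, failctr => failctr
  | n + 1, failctr =>
    if cond then (if failctr = nonzeroes then failctr else failLoop cond nonzeroes n (failctr + 1))
    else failctr

def play_perfect (rows : List Int) : Int × Int :=
  let nonzeroes : Int := (rows.length : Int) - (PySem.List.count rows 0 : Int)
  let lrows := PySem.List.sorted2 ((PySem.List.enumerate rows 0).map (fun p => (p.2, p.1)))
      (fun p => p.1) (fun p => p.2)
  let lrows := lrows.map (fun p => (PySem.Int.mod p.1 (nimMax + 1), p.2))
  let idx := tensor_index lrows
  if idx = 0 then
    (((PySem.List.pyGet? lrows (-1)).getD (0, 0)).2, 1)   -- last element of lrows; none (IndexError) excluded by Pre_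
  else
    let last := (PySem.List.pyGet? lrows (-1)).getD (0, 0)
    let cond := decide ((PySem.List.pyGet? rows last.2).getD 0 < idx)
    let _failctr := failLoop cond nonzeroes ((nonzeroes + 1).toNat) 0
    (last.2, idx)

-- ===== PORT B =====
def play_perfect_alt (rows : List Int) : Int × Int :=
  -- best = max(range(len(rows)), key=lambda i: (rows[i], i)); raises (ValueError) on [] — excluded by Pre_
  let best := (PySem.List.max2? (PySem.List.pyRange 0 (rows.length : Int) 1)
      (fun i => PySem.List.pyGetD rows i 0) (fun i => i)).getD 0
  let s := PySem.Int.mod rows.sum (nimMax + 1)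
  (best, if s = 0 then 1 else s)

-- ===== PRECONDITION & SPEC =====
-- Python A raises IndexError taking the last element of lrows on the empty list (B's max(range(0), ...) raises ValueError).
def Pre_play_perfect (rows : List Int) : Prop := rows ≠ []
instance (rows : List Int) : Decidable (Pre_play_perfect rows) := by unfold Pre_play_perfect; infer_instance
def pvWitness_play_perfect : List Int := ([1, 2, 3])

def Spec_play_perfect (rows : List Int) (out : Int × Int) : Prop := out = play_perfect_alt rows
instance (rows : List Int) (out : Int × Int) : Decidable (Spec_play_perfect rows out) := by unfold Spec_play_perfect; infer_instance

-- ===== CLAIM (what is proved, stated in full; the proofs are below) =====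
def Claim_equal_play_perfect : Prop := ∀ (rows : List Int), Dom_play_perfect rows → Pre_play_perfect rows → Spec_play_perfect rows (play_perfect rows)

-- ===== LEMMAS AND PROOFS =====

-- the lexicographic key both programs maximise: A through the last element of the sorted list, B through a linear max
def lkey (p : Int × Int) : ℤ ×ₗ ℤ := toLex p

theorem before_eq :
    (fun (a b : Int × Int) => decide (a.1 < b.1) || (!decide (b.1 < a.1) && decide (a.2 < b.2)))
      = (fun a b => decide (lkey a < lkey b)) := by
  funext a b
  rcases lt_trichotomy a.1 b.1 with h | h | h <;>
    simp [lkey, Prod.Lex.lt_iff, h, lt_asymm]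

theorem sorted2_eq_sorted_lex (xs : List (Int × Int)) :
    PySem.List.sorted2 xs (fun p => p.1) (fun p => p.2)
      = PySem.List.sorted xs (fun p => lkey p) false := by
  unfold PySem.List.sorted2 PySem.List.sorted
  beta_reduce
  rw [before_eq]

theorem max2?_eq_max?_lex (xs : List Int) (rows : List Int) :
    PySem.List.max2? xs (fun i => PySem.List.pyGetD rows i 0) (fun i => i)
      = PySem.List.max? xs (fun i => lkey (PySem.List.pyGetD rows i 0, i)) := by
  unfold PySem.List.max2? PySem.List.max?
  congr 1
  funext acc x
  beta_reduce
  cases acc with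
  | none => rfl
  | some m =>
    have h := congrFun (congrFun before_eq (PySem.List.pyGetD rows m 0, m))
      (PySem.List.pyGetD rows x 0, x)
    simp only at h
    simp only [h]
    simp

theorem pairwise_le_getLast {α κ : Type} [Preorder κ] (key : α → κ) {l : List α} :
    l.Pairwise (fun a b => key a ≤ key b) → ∀ {m : α},
      l.getLast? = some m → ∀ x ∈ l, key x ≤ key m := by
  induction l with
  | nil => intro _ m hl; simp at hl
  | cons a t ih =>
    intro h m hl x hx
    cases t with
    | nil =>
      simp at hl hx
      subst hl; subst hx; exact le_refl _
    | cons b t' =>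
      have hl' : (b :: t').getLast? = some m := by
        simpa [List.getLast?_cons_cons] using hl
      rcases List.mem_cons.mp hx with rfl | hx'
      · exact (List.pairwise_cons.mp h).1 m (List.mem_of_getLast? hl')
      · exact ih (List.pairwise_cons.mp h).2 hl' x hx'

theorem tensorLoop_emod (l : List (Int × Int)) (a : Int) :
    tensorLoop l (a % 4) = (a + (l.map Prod.fst).sum) % 4 := by
  induction l generalizing a with
  | nil => simp [tensorLoop]
  | cons p rest ih =>
    show tensorLoop rest (PySem.Int.mod (a % 4 + p.1) (nimMax + 1)) = _
    have : PySem.Int.mod (a % 4 + p.1) (nimMax + 1) = (a + p.1) % 4 := by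
      rw [PySem.Int.mod_eq_emod_of_pos (by norm_num [nimMax])]
      show (a % 4 + p.1) % 4 = (a + p.1) % 4
      omega
    rw [this, ih (a + p.1), List.map_cons, List.sum_cons]
    ring_nf

theorem sum_fst_filter_nz (l : List (Int × Int)) :
    ((l.filter (fun p => p.1 ≠ 0)).map Prod.fst).sum = (l.map Prod.fst).sum := by
  induction l with
  | nil => rfl
  | cons p rest ih =>
    by_cases h : p.1 = 0
    · rw [List.filter_cons_of_neg (by simp [h]), ih, List.map_cons, List.sum_cons, h, zero_add]
    · rw [List.filter_cons_of_pos (by simp [h]), List.map_cons, List.sum_cons, ih,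
        List.map_cons, List.sum_cons]

theorem sum_map_mod (l : List (Int × Int)) :
    (l.map (fun p => (PySem.Int.mod p.1 (nimMax + 1), p.2))).map Prod.fst
      = l.map (fun p => PySem.Int.mod p.1 4) := by
  rw [List.map_map]; rfl

theorem sum_mod_fst (l : List (Int × Int)) :
    (l.map (fun p => PySem.Int.mod p.1 4)).sum % 4 = (l.map Prod.fst).sum % 4 := by
  induction l with
  | nil => rfl
  | cons p rest ih =>
    simp only [List.map_cons, List.sum_cons]
    rw [PySem.Int.mod_eq_emod_of_pos (by norm_num)]
    omega

theorem tensor_index_eq (rows : List Int) :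
    tensor_index ((PySem.List.sorted2 ((PySem.List.enumerate rows 0).map (fun p => (p.2, p.1)))
        (fun p => p.1) (fun p => p.2)).map (fun p => (PySem.Int.mod p.1 (nimMax + 1), p.2)))
      = PySem.Int.mod rows.sum (nimMax + 1) := by
  unfold tensor_index
  show tensorLoop _ 0 = _
  have h0 : ∀ l : List (Int × Int), tensorLoop l 0 = (0 + (l.map Prod.fst).sum) % 4 := by
    intro l
    have := tensorLoop_emod l 0
    norm_num at this ⊢
    exact this
  rw [h0, sum_fst_filter_nz, sum_map_mod, zero_add]
  rw [PySem.Int.mod_eq_emod_of_pos (by norm_num [nimMax]), sum_mod_fst]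
  have hperm : ((PySem.List.sorted2 ((PySem.List.enumerate rows 0).map (fun p => (p.2, p.1)))
      (fun p => p.1) (fun p => p.2)).map Prod.fst).Perm
        (((PySem.List.enumerate rows 0).map (fun p => (p.2, p.1))).map Prod.fst) := by
    exact (PySem.List.sorted2_perm _ _ _ _).map Prod.fst
  rw [hperm.sum_eq, List.map_map]
  have : (Prod.fst ∘ fun (p : Int × Int) => (p.2, p.1)) = fun p => p.2 := rfl
  rw [this, PySem.List.map_snd_enumerate]
  norm_num [nimMax]

theorem index_agree (rows : List Int) (hne : rows ≠ []) :
    (((PySem.List.pyGet? ((PySem.List.sorted2 ((PySem.List.enumerate rows 0).map (fun p => (p.2, p.1)))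
        (fun p => p.1) (fun p => p.2)).map (fun p => (PySem.Int.mod p.1 (nimMax + 1), p.2))) (-1)).getD (0, 0)).2)
      = (PySem.List.max2? (PySem.List.pyRange 0 (rows.length : Int) 1)
          (fun i => PySem.List.pyGetD rows i 0) (fun i => i)).getD 0 := by
  set pairs := (PySem.List.enumerate rows 0).map (fun p => (p.2, p.1)) with hpairs
  rw [sorted2_eq_sorted_lex, max2?_eq_max?_lex]
  set srt := PySem.List.sorted pairs (fun p => lkey p) false with hsrt
  have hpne : pairs ≠ [] := by
    intro h
    apply hne
    have := congrArg List.length h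
    simpa [hpairs, PySem.List.length_enumerate] using this
  have hsne : srt ≠ [] := by
    rw [hsrt, Ne, PySem.List.sorted_eq_nil_iff]; exact hpne
  obtain ⟨m, hm⟩ : ∃ m, srt.getLast? = some m := by
    cases h : srt.getLast? with
    | none => exact absurd (List.getLast?_eq_none_iff.mp h) hsne
    | some m => exact ⟨m, rfl⟩
  have hA : (((PySem.List.pyGet? (srt.map (fun p => (PySem.Int.mod p.1 (nimMax + 1), p.2))) (-1)).getD (0, 0)).2) = m.2 := by
    rw [PySem.List.pyGet?_neg_one, List.getLast?_map, hm]
    rfl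
  rw [hA]
  have hrne : PySem.List.pyRange 0 (rows.length : Int) 1 ≠ [] := by
    have : (0:Int) ∈ PySem.List.pyRange 0 (rows.length : Int) 1 := by
      rw [PySem.List.mem_pyRange_one]
      constructor
      · exact le_refl 0
      · exact_mod_cast List.length_pos_iff.mpr hne
    intro h; rw [h] at this; exact List.not_mem_nil this
  obtain ⟨b, hb⟩ : ∃ b, PySem.List.max? (PySem.List.pyRange 0 (rows.length : Int) 1)
      (fun i => lkey (PySem.List.pyGetD rows i 0, i)) = some b := by
    cases h : PySem.List.max? (PySem.List.pyRange 0 (rows.length : Int) 1)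
        (fun i => lkey (PySem.List.pyGetD rows i 0, i)) with
    | none => exact absurd ((PySem.List.max?_eq_none_iff _ _).mp h) hrne
    | some b => exact ⟨b, rfl⟩
  rw [hb]
  show m.2 = b
  have hmaxA : ∀ q ∈ pairs, lkey q ≤ lkey m := by
    intro q hq
    have hq' : q ∈ srt := by
      rw [hsrt, (PySem.List.sorted_perm pairs (fun p => lkey p) false).mem_iff]; exact hq
    exact pairwise_le_getLast lkey (by rw [hsrt]; exact PySem.List.sorted_pairwise pairs (fun p => lkey p)) hm q hq'
  have hmem_m : m ∈ pairs := by
    rw [← (PySem.List.sorted_perm pairs (fun p => lkey p) false).mem_iff]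
    exact List.mem_of_getLast? hm
  have hmaxB : ∀ i ∈ PySem.List.pyRange 0 (rows.length : Int) 1,
      lkey (PySem.List.pyGetD rows i 0, i) ≤ lkey (PySem.List.pyGetD rows b 0, b) :=
    PySem.List.max?_isMax hb
  have hmem_b : b ∈ PySem.List.pyRange 0 (rows.length : Int) 1 := PySem.List.max?_mem hb
  have hpair_iff : ∀ q : Int × Int, q ∈ pairs ↔
      ∃ (k : Nat) (h : k < rows.length), q = (rows[k], (k : Int)) := by
    intro q
    rw [hpairs, List.mem_map]
    constructor
    · rintro ⟨p, hp, rfl⟩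
      obtain ⟨k, hk, rfl⟩ := (PySem.List.mem_enumerate_iff rows 0 p).mp hp
      exact ⟨k, hk, by simp⟩
    · rintro ⟨k, hk, rfl⟩
      exact ⟨((k : Int), rows[k]), (PySem.List.mem_enumerate_iff rows 0 _).mpr ⟨k, hk, by simp⟩, rfl⟩
  obtain ⟨k, hk, hmk⟩ := (hpair_iff m).mp hmem_m
  have hbr := PySem.List.mem_pyRange_one.mp hmem_b
  have hblt : b.toNat < rows.length := by omega
  have hget_b : PySem.List.pyGetD rows b 0 = rows[b.toNat] := by
    rw [PySem.List.pyGetD_of_nonneg rows 0 hbr.1, List.getD_eq_getElem rows 0 hblt]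
  have hpair_b : (PySem.List.pyGetD rows b 0, b) ∈ pairs := by
    rw [hpair_iff]
    exact ⟨b.toNat, hblt, by rw [hget_b]; congr 1; omega⟩
  have hk_mem : (k : Int) ∈ PySem.List.pyRange 0 (rows.length : Int) 1 := by
    rw [PySem.List.mem_pyRange_one]; constructor
    · exact Int.natCast_nonneg k
    · exact_mod_cast hk
  have hget_k : PySem.List.pyGetD rows (k : Int) 0 = rows[k] := by
    rw [PySem.List.pyGetD_of_nonneg rows 0 (Int.natCast_nonneg k), List.getD_eq_getElem rows 0 (by simpa using hk)]
    simp
  have h1 : lkey (PySem.List.pyGetD rows b 0, b) ≤ lkey m := hmaxA _ hpair_b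
  have h2 : lkey m ≤ lkey (PySem.List.pyGetD rows b 0, b) := by
    have := hmaxB (k : Int) hk_mem
    rw [hget_k, ← hmk] at this
    exact this
  have : lkey m = lkey (PySem.List.pyGetD rows b 0, b) := le_antisymm h2 h1
  have : m = (PySem.List.pyGetD rows b 0, b) := by
    have h3 := congrArg (fun x => (ofLex x : Int × Int)) this
    simpa [lkey] using h3
  rw [this]

theorem main_eq (rows : List Int) (hne : rows ≠ []) :
    play_perfect rows = play_perfect_alt rows := by
  simp only [play_perfect, play_perfect_alt]
  rw [tensor_index_eq]
  by_cases hs : PySem.Int.mod rows.sum (nimMax + 1) = 0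
  · rw [if_pos hs, if_pos hs, index_agree rows hne]
  · rw [if_neg hs, if_neg hs, index_agree rows hne]

-- ===== VERDICT (by name: the statement is the Claim_ definition above) =====
theorem play_perfect_spec : Claim_equal_play_perfect := by
  intro rows _ hne
  unfold Spec_play_perfect
  exact main_eq rows hne
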